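-- pv_equiv track=rewrite | github.com/BIGSHOL/mathteacher | backend/app/services/blank_service.py | _get_rule_for_round
-- ===== SOURCE A (Python) =====
-- def _get_rule_for_round(round_rules: list, attempt_count: int) -> dict | None:
--     """회차에 맞는 규칙 찾기."""
--     # 정확히 일치하는 규칙 찾기
--     for rule in round_rules:
--         if rule.get("round") == attempt_count:
--             return rule
--
--     # 없으면 가장 높은 회차 규칙 사용
--     if round_rules:
--         highest_rule = max(round_rules, key=lambda r: r.get("round", 0))
--         if attempt_count >= highest_rule.get("round", 0):
--             return highest_rule
--
--     return None
-- ===== SOURCE B (Python) =====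
-- def _get_rule_for_round(round_rules: list, attempt_count: int) -> dict | None:
--     """Hash-index the first rule per round value for the exact lookup; take the
--     fallback from the top of a stable descending sort instead of max()."""
--     index = {}
--     for rule in round_rules:
--         index.setdefault(rule.get("round"), rule)
--     exact = index.get(attempt_count)
--     if exact is not None:
--         return exact
--     ranked = sorted(round_rules, key=lambda r: r.get("round", 0), reverse=True)
--     if ranked and attempt_count >= ranked[0].get("round", 0):
--         return ranked[0]
--     return None
-- ===== Notes on version B (the rewrite author's own statement) =====
-- stated objective: alternative
-- what changed: B builds a hash index (dict keyed by round value, first occurrence wins) once and answers the exact-match question by a single dict lookup instead of A's linear scan, and obtains the fallback rule as the head of a stable descending sort instead of A's max() call.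
import Mathlib
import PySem

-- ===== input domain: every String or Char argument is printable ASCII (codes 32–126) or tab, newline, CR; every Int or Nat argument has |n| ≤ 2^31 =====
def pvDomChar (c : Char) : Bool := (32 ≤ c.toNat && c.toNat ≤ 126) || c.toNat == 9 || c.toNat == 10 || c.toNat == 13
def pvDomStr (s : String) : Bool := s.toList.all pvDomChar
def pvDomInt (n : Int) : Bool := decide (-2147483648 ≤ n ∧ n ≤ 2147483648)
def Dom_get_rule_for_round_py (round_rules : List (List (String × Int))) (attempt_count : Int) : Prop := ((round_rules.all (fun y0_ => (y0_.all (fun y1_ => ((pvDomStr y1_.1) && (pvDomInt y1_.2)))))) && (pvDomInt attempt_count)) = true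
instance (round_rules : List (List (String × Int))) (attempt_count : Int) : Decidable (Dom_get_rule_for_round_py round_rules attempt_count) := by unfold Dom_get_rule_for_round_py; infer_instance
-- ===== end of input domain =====

-- B answers the exact-match question via a dict index built once (first rule per
-- round value) and takes the fallback from the head of a stable descending sort
-- instead of A's scan-then-max; objective: alternative.


-- ===== PORT A =====
-- for rule in round_rules: if rule.get("round") == attempt_count: return rule
-- (None == attempt_count is False, so the test is get? = some attempt_count);
-- then if nonempty, highest = max(..., key=lambda r: r.get("round", 0)) and compare.
def get_rule_for_round_py (round_rules : List (List (String × Int))) (attempt_count : Int) : Option (List (String × Int)) :=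
  match round_rules.find? (fun rule => (PySem.Dict.mk rule).get? "round" == some attempt_count) with
  | some rule => some rule
  | none =>
    match round_rules with
    | [] => none  -- 'if round_rules:' falls through; return None
    | _ :: _ =>
      match PySem.List.max? round_rules (fun r => (PySem.Dict.mk r).getD "round" (0:Int)) with
      | some highest_rule =>
          if attempt_count ≥ (PySem.Dict.mk highest_rule).getD "round" (0:Int) then some highest_rule else none
      | none => none  -- unreachable: list nonempty

-- ===== PORT B =====
-- index = {}; for rule: index.setdefault(rule.get("round"), rule); exact = index.get(attempt_count);
-- fallback: ranked = sorted(..., key=..., reverse=True); ranked[0] if attempt_count >= its round.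
def pvIndex (round_rules : List (List (String × Int))) : PySem.Dict (Option Int) (List (String × Int)) :=
  round_rules.foldl (fun d rule => d.setdefault ((PySem.Dict.mk rule).get? "round") rule) PySem.Dict.empty

def pvRanked (round_rules : List (List (String × Int))) : List (List (String × Int)) :=
  PySem.List.sorted round_rules (fun r => (PySem.Dict.mk r).getD "round" (0:Int)) true

def get_rule_for_round_py_alt (round_rules : List (List (String × Int))) (attempt_count : Int) : Option (List (String × Int)) :=
  match (pvIndex round_rules).get? (some attempt_count) with
  | some exact => some exact
  | none =>
    match pvRanked round_rules with
    | [] => none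
    | b :: _ => if attempt_count ≥ (PySem.Dict.mk b).getD "round" (0:Int) then some b else none

-- ===== PRECONDITION & SPEC =====
def Spec_get_rule_for_round_py (round_rules : List (List (String × Int))) (attempt_count : Int) (out : Option (List (String × Int))) : Prop := out = get_rule_for_round_py_alt round_rules attempt_count
instance (round_rules : List (List (String × Int))) (attempt_count : Int) (out : Option (List (String × Int))) : Decidable (Spec_get_rule_for_round_py round_rules attempt_count out) := by unfold Spec_get_rule_for_round_py; infer_instance

-- ===== CLAIM (what is proved, stated in full; the proofs are below) =====
def Claim_equal_get_rule_for_round_py : Prop := ∀ (round_rules : List (List (String × Int))) (attempt_count : Int), Dom_get_rule_for_round_py round_rules attempt_count → Spec_get_rule_for_round_py round_rules attempt_count (get_rule_for_round_py round_rules attempt_count)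

-- ===== LEMMAS AND PROOFS =====

-- The setdefault-built index looks up the FIRST rule whose round value is k
-- (continuing from any dict d).
theorem pv_index_get? (keyOf : List (String × Int) → Option Int)
    (xs : List (List (String × Int))) (d : PySem.Dict (Option Int) (List (String × Int)))
    (k : Option Int) :
    (xs.foldl (fun d rule => d.setdefault (keyOf rule) rule) d).get? k
      = match d.get? k with
        | some v => some v
        | none => xs.find? (fun rule => keyOf rule == k) := by
  induction xs generalizing d with
  | nil => cases hd : d.get? k <;> simp [hd]
  | cons r rest ih =>
    rw [List.foldl_cons, ih]
    by_cases hk : keyOf r = k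
    · cases hd : d.get? k with
      | some v =>
        have hc : d.contains (keyOf r) = true := by
          rw [PySem.Dict.contains_eq_isSome_get?, hk, hd]; rfl
        rw [PySem.Dict.setdefault_of_contains d r hc, hd]
      | none =>
        have hc : d.contains (keyOf r) = false := by
          rw [PySem.Dict.contains_eq_isSome_get?, hk, hd]; rfl
        rw [PySem.Dict.setdefault_of_not_contains d r hc, hk,
            PySem.Dict.get?_insert_self]
        simp [List.find?, hk]
    · rw [PySem.Dict.get?_setdefault_of_ne d r (Ne.symm hk)]
      cases d.get? k with
      | some v => rfl
      | none =>
        rw [List.find?]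
        rw [show (keyOf r == k) = false from beq_eq_false_iff_ne.mpr hk]

-- Inserting into a reverse-sorted accumulator updates its head exactly like
-- one step of the running-max loop (strict <, first maximum kept).
theorem pv_insertBy_head (key : List (String × Int) → Int)
    (x : List (String × Int)) (acc : List (List (String × Int))) :
    (PySem.List.insertBy (fun a b => decide (key b < key a)) x acc).head?
      = acc.head?.elim (some x) (fun m => if key m < key x then some x else some m) := by
  cases acc with
  | nil => rfl
  | cons h t =>
    simp only [PySem.List.insertBy, List.head?]
    by_cases hc : key h < key x <;> simp [hc]

-- max? as a fold of a matcher-free step function.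
theorem pv_max_eq (key : List (String × Int) → Int) (xs : List (List (String × Int))) :
    PySem.List.max? xs key
      = xs.foldl (fun o x => o.elim (some x) (fun m => if key m < key x then some x else some m)) none := by
  unfold PySem.List.max?
  apply List.foldl_ext
  intro acc x _
  cases acc <;> rfl

-- The head of the stable descending sort IS the first maximum: max?.
theorem pv_sorted_rev_head (key : List (String × Int) → Int)
    (xs : List (List (String × Int))) :
    (PySem.List.sorted xs key true).head? = PySem.List.max? xs key := by
  rw [PySem.List.sorted_rev_eq_foldl_insertBy, pv_max_eq]
  suffices h : ∀ (acc : List (List (String × Int))),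
      (xs.foldl (fun acc x => PySem.List.insertBy (fun a b => decide (key b < key a)) x acc) acc).head?
        = xs.foldl (fun o x => o.elim (some x) (fun m => if key m < key x then some x else some m)) acc.head? by
    have := h []
    rw [List.head?_nil] at this
    exact this
  induction xs with
  | nil => intro acc; rfl
  | cons h t ih =>
    intro acc
    rw [List.foldl_cons, List.foldl_cons, ih, pv_insertBy_head]

theorem pv_equal : ∀ (round_rules : List (List (String × Int))) (attempt_count : Int),
    get_rule_for_round_py round_rules attempt_count
      = get_rule_for_round_py_alt round_rules attempt_count := by
  intro rrs ac
  unfold get_rule_for_round_py get_rule_for_round_py_alt pvIndex pvRanked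
  rw [pv_index_get? (fun rule => (PySem.Dict.mk rule).get? "round") rrs PySem.Dict.empty (some ac)]
  rw [show (PySem.Dict.empty : PySem.Dict (Option Int) (List (String × Int))).get? (some ac) = none from rfl]
  cases hf : rrs.find? (fun rule => (PySem.Dict.mk rule).get? "round" == some ac) with
  | some r => rfl
  | none =>
    cases hs : PySem.List.sorted rrs (fun r => (PySem.Dict.mk r).getD "round" (0:Int)) true with
    | nil =>
      have : rrs = [] := (PySem.List.sorted_eq_nil_iff _ _ _).mp hs
      subst this; rfl
    | cons b t =>
      have hrrs : rrs ≠ [] := by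
        intro h; subst h; simp [PySem.List.sorted] at hs
      have hmax : PySem.List.max? rrs (fun r => (PySem.Dict.mk r).getD "round" (0:Int)) = some b := by
        rw [← pv_sorted_rev_head, hs]; rfl
      cases rrs with
      | nil => exact absurd rfl hrrs
      | cons a u => rw [hmax]

-- ===== VERDICT (by name: the statement is the Claim_ definition above) =====
theorem get_rule_for_round_py_spec : Claim_equal_get_rule_for_round_py := by
  intro rrs ac _
  unfold Spec_get_rule_for_round_py
  exact pv_equal rrs ac
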